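-- pv_equiv track=rewrite | github.com/amosbastian/utopian-spreadsheet | spreadsheet.py | valid_category
-- ===== SOURCE A (Python) =====
-- def valid_category(tags):
--     """Returns True if category is valid, otherwise False"""
--     for category in tags:
--         if "task" in category:
--             if "bug" in category:
--                 return True, "task-bug-hunting"
--             return True, category
--         if category == "blog" or category == "blogs":
--             return True, "blog"
--         elif "idea" in category or "suggestion" in category:
--             return True, "ideas"
--         elif "develop" in category:
--             return True, "development"
--         elif category == "graphic" or category == "graphics":
--             return True, "graphics"
--         elif "bughunt" in category or "bug-hunt" in category:
--             return True, "bug-hunting"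
--         elif "analysis" in category:
--             return True, "analysis"
--         elif "visibility" in category or "social" in category:
--             return True, "social"
--         elif "videotut" in category or "video-tut" in category:
--             return True, "video-tutorials"
--         elif category == "tutorial" or category == "tutorials":
--             return True, "tutorials"
--         elif "copywrit" in category:
--             return True, "copywriting"
--         elif "document" in category:
--             return True, "documentation"
--         elif "translation" in category:
--             return True, "translations"
--     return False, ""
-- ===== SOURCE B (Python) =====
-- # Different algorithm: instead of a first-match cascade, collect EVERY (tag_index, priority, category)
-- # match across all tags into one candidate list and select the lexicographic minimum (no early exit).
-- EXACT = {"blog": (1, "blog"), "blogs": (1, "blog"),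
--          "graphic": (4, "graphics"), "graphics": (4, "graphics"),
--          "tutorial": (9, "tutorials"), "tutorials": (9, "tutorials")}
--
-- SUBSTR = [(2, ("idea", "suggestion"), "ideas"),
--           (3, ("develop",), "development"),
--           (5, ("bughunt", "bug-hunt"), "bug-hunting"),
--           (6, ("analysis",), "analysis"),
--           (7, ("visibility", "social"), "social"),
--           (8, ("videotut", "video-tut"), "video-tutorials"),
--           (10, ("copywrit",), "copywriting"),
--           (11, ("document",), "documentation"),
--           (12, ("translation",), "translations")]
--
--
-- def _matches(tag):
--     """All (priority, category) matches of one tag, in any order."""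
--     out = []
--     if "task" in tag:
--         out.append((0, "task-bug-hunting" if "bug" in tag else tag))
--     hit = EXACT.get(tag)
--     if hit is not None:
--         out.append(hit)
--     for prio, kws, cat in SUBSTR:
--         if any(k in tag for k in kws):
--             out.append((prio, cat))
--     return out
--
--
-- def valid_category(tags):
--     candidates = [(i, m) for i, tag in enumerate(tags) for m in _matches(tag)]
--     if not candidates:
--         return False, ""
--     _i, (_prio, cat) = min(candidates)
--     return True, cat
-- ===== Notes on version B (the rewrite author's own statement) =====
-- stated objective: alternative
-- what changed: Instead of returning at the first matching branch of an if/elif cascade, B enumerates every (tag index, rule priority, category) match over all tags into one candidate list and selects the lexicographic minimum with min().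
import Mathlib
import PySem

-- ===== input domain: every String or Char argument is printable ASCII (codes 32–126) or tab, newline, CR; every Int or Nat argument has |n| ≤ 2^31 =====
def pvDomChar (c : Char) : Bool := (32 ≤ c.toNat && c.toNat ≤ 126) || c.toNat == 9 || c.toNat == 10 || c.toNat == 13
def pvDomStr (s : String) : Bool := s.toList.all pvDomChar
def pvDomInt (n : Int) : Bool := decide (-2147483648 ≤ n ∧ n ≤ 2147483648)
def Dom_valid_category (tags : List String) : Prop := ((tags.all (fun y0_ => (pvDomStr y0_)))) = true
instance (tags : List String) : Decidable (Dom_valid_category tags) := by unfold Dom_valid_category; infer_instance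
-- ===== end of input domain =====

-- B replaces A's first-match cascade with a different algorithm: collect all (tag index, rule priority,
-- category) matches into one candidate list and select the lexicographic minimum (alternative; same cost class).


-- ===== PORT A =====
def valid_category (tags : List String) : Bool × String :=
  match tags with
  | [] => (false, "")
  | category :: rest =>
    if PySem.Str.isIn "task" category then
      (if PySem.Str.isIn "bug" category then (true, "task-bug-hunting") else (true, category))
    else if category == "blog" || category == "blogs" then (true, "blog")
    else if PySem.Str.isIn "idea" category || PySem.Str.isIn "suggestion" category then (true, "ideas")
    else if PySem.Str.isIn "develop" category then (true, "development")
    else if category == "graphic" || category == "graphics" then (true, "graphics")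
    else if PySem.Str.isIn "bughunt" category || PySem.Str.isIn "bug-hunt" category then (true, "bug-hunting")
    else if PySem.Str.isIn "analysis" category then (true, "analysis")
    else if PySem.Str.isIn "visibility" category || PySem.Str.isIn "social" category then (true, "social")
    else if PySem.Str.isIn "videotut" category || PySem.Str.isIn "video-tut" category then (true, "video-tutorials")
    else if category == "tutorial" || category == "tutorials" then (true, "tutorials")
    else if PySem.Str.isIn "copywrit" category then (true, "copywriting")
    else if PySem.Str.isIn "document" category then (true, "documentation")
    else if PySem.Str.isIn "translation" category then (true, "translations")
    else valid_category rest

-- ===== PORT B =====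
def pvExact : PySem.Dict String (Nat × String) :=
  PySem.Dict.mk [("blog", (1, "blog")), ("blogs", (1, "blog")),
    ("graphic", (4, "graphics")), ("graphics", (4, "graphics")),
    ("tutorial", (9, "tutorials")), ("tutorials", (9, "tutorials"))]

def pvSubstr : List (Nat × List String × String) :=
  [(2, ["idea", "suggestion"], "ideas"),
   (3, ["develop"], "development"),
   (5, ["bughunt", "bug-hunt"], "bug-hunting"),
   (6, ["analysis"], "analysis"),
   (7, ["visibility", "social"], "social"),
   (8, ["videotut", "video-tut"], "video-tutorials"),
   (10, ["copywrit"], "copywriting"),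
   (11, ["document"], "documentation"),
   (12, ["translation"], "translations")]

-- all (priority, category) matches of one tag (`_matches` in Source B)
def pvMatches (tag : String) : List (Nat × String) :=
  (if PySem.Str.isIn "task" tag then
     [(0, if PySem.Str.isIn "bug" tag then "task-bug-hunting" else tag)] else []) ++
  (pvExact.get? tag).toList ++
  pvSubstr.filterMap (fun r =>
    if r.2.1.any (fun k => PySem.Str.isIn k tag) then some (r.1, r.2.2) else none)

-- Python's tuple `<` (lexicographic), used by `min`
def pvLt2 (a b : Nat × String) : Bool :=
  decide (a.1 < b.1 ∨ (a.1 = b.1 ∧ a.2 < b.2))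
def pvLt3 (a b : Int × Nat × String) : Bool :=
  decide (a.1 < b.1) || (decide (a.1 = b.1) && pvLt2 a.2 b.2)

def pvCandidates (tags : List String) : List (Int × Nat × String) :=
  (PySem.List.enumerate tags 0).flatMap (fun p => (pvMatches p.2).map (fun m => (p.1, m)))

-- `_select` in Source B: `min` = foldl keeping the first minimum
def pvSelect (c : List (Int × Nat × String)) : Bool × String :=
  match c with
  | [] => (false, "")
  | x :: xs => (true, (xs.foldl (fun b y => if pvLt3 y b then y else b) x).2.2)

def valid_category_alt (tags : List String) : Bool × String :=
  pvSelect (pvCandidates tags)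

-- ===== PRECONDITION & SPEC =====
def Spec_valid_category (tags : List String) (out : Bool × String) : Prop := out = valid_category_alt tags
instance (tags : List String) (out : Bool × String) : Decidable (Spec_valid_category tags out) := by unfold Spec_valid_category; infer_instance

-- ===== CLAIM (what is proved, stated in full; the proofs are below) =====
def Claim_equal_valid_category : Prop := ∀ (tags : List String), Dom_valid_category tags → Spec_valid_category tags (valid_category tags)

-- ===== LEMMAS AND PROOFS =====

-- proof-only abbreviations for the two match shapes
def pvSel2 (l : List (Nat × String)) (fb : Bool × String) : Bool × String :=
  match l with
  | [] => fb
  | m :: ms => (true, (ms.foldl (fun b y => if pvLt2 y b then y else b) m).2)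

def pvSelO (o : Option (Nat × String)) (fb : Bool × String) : Bool × String :=
  match o with
  | none => fb
  | some m => (true, m.2)

-- a fold with the keep-first-minimum step never moves off b when nothing beats b
lemma foldl_stay2 (l : List (Nat × String)) (b : Nat × String)
    (h : ∀ y ∈ l, pvLt2 y b = false) :
    l.foldl (fun b y => if pvLt2 y b then y else b) b = b := by
  induction l with
  | nil => rfl
  | cons y ys ih =>
    have hy := h y (List.mem_cons_self)
    simp only [List.foldl_cons, hy, Bool.false_eq_true, if_false]
    exact ih (fun z hz => h z (List.mem_cons_of_mem _ hz))

lemma foldl_stay3 (l : List (Int × Nat × String)) (b : Int × Nat × String)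
    (h : ∀ y ∈ l, pvLt3 y b = false) :
    l.foldl (fun b y => if pvLt3 y b then y else b) b = b := by
  induction l with
  | nil => rfl
  | cons y ys ih =>
    have hy := h y (List.mem_cons_self)
    simp only [List.foldl_cons, hy, Bool.false_eq_true, if_false]
    exact ih (fun z hz => h z (List.mem_cons_of_mem _ hz))

lemma lt3_zero (a b : Nat × String) : pvLt3 (0, a) (0, b) = pvLt2 a b := by
  simp [pvLt3]

lemma lt3_shift (s : Int) (a b : Int × Nat × String) :
    pvLt3 (a.1 + s, a.2) (b.1 + s, b.2) = pvLt3 a b := by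
  simp [pvLt3]

-- folding the index-0 block then an all-positive-index block from an index-0 start
lemma zero_fold (ms : List (Nat × String)) (l2 : List (Int × Nat × String)) (m : Nat × String)
    (h : ∀ y ∈ l2, 1 ≤ y.1) :
    ((ms.map (fun m => ((0 : Int), m)) ++ l2).foldl
        (fun b y => if pvLt3 y b then y else b) (0, m)) =
      ((0 : Int), ms.foldl (fun b y => if pvLt2 y b then y else b) m) := by
  rw [List.foldl_append]
  have h1 : ∀ (ms : List (Nat × String)) (m : Nat × String),
      (ms.map (fun m => ((0 : Int), m))).foldl (fun b y => if pvLt3 y b then y else b) (0, m)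
        = ((0 : Int), ms.foldl (fun b y => if pvLt2 y b then y else b) m) := by
    intro ms
    induction ms with
    | nil => intro m; rfl
    | cons a as ih =>
      intro m
      simp only [List.map_cons, List.foldl_cons, lt3_zero]
      rw [← apply_ite (fun z => ((0 : Int), z))]
      exact ih _
  rw [h1]
  exact foldl_stay3 _ _ (fun y hy => by
    have := h y hy
    simp only [pvLt3, pvLt2]
    have h1 : ¬ (y.1 < (0 : Int)) := by omega
    have h2 : ¬ (y.1 = (0 : Int)) := by omega
    simp [h1, h2])

lemma foldl_shift (s : Int) (l : List (Int × Nat × String)) (b : Int × Nat × String) :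
    (l.map (fun y => (y.1 + s, y.2))).foldl (fun b y => if pvLt3 y b then y else b) (b.1 + s, b.2)
      = ((l.foldl (fun b y => if pvLt3 y b then y else b) b).1 + s,
         (l.foldl (fun b y => if pvLt3 y b then y else b) b).2) := by
  induction l generalizing b with
  | nil => rfl
  | cons y ys ih =>
    cases hc : pvLt3 y b
    · simp only [List.map_cons, List.foldl_cons, lt3_shift, hc, Bool.false_eq_true, if_false]
      exact ih b
    · simp only [List.map_cons, List.foldl_cons, lt3_shift, hc, if_true]
      exact ih y

lemma select_shift (l : List (Int × Nat × String)) :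
    pvSelect (l.map (fun y => (y.1 + 1, y.2))) = pvSelect l := by
  cases l with
  | nil => rfl
  | cons x xs =>
    simp only [List.map_cons, pvSelect]
    rw [show (x.1 + 1, x.2) = ((x.1 + 1 : Int), x.2) from rfl, foldl_shift]

lemma cand_at (l : List String) (s : Int) :
    (PySem.List.enumerate l s).flatMap (fun p => (pvMatches p.2).map (fun m => (p.1, m)))
      = ((PySem.List.enumerate l 0).flatMap (fun p => (pvMatches p.2).map (fun m => (p.1, m)))).map
          (fun y => (y.1 + s, y.2)) := by
  induction l generalizing s with
  | nil => simp [PySem.List.enumerate_nil]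
  | cons x xs ih =>
    rw [PySem.List.enumerate_cons, PySem.List.enumerate_cons]
    simp only [List.flatMap_cons, List.map_append, List.map_map]
    rw [ih (s + 1), ih (0 + 1)]
    simp only [List.map_map]
    congr 1
    · apply List.map_congr_left; intro m _; simp
    · apply List.map_congr_left; intro y _
      simp only [Function.comp_apply, Prod.mk.injEq]
      refine ⟨by omega, trivial⟩

lemma cand_cons (t : String) (rest : List String) :
    pvCandidates (t :: rest)
      = (pvMatches t).map (fun m => ((0 : Int), m))
        ++ (pvCandidates rest).map (fun y => (y.1 + 1, y.2)) := by
  unfold pvCandidates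
  rw [PySem.List.enumerate_cons]
  simp only [List.flatMap_cons]
  rw [cand_at rest (0 + 1)]
  norm_num

lemma cand_nonneg (l : List String) : ∀ y ∈ pvCandidates l, 0 ≤ y.1 := by
  intro y hy
  unfold pvCandidates at hy
  rw [List.mem_flatMap] at hy
  obtain ⟨p, hp, hyp⟩ := hy
  rw [PySem.List.mem_enumerate_iff] at hp
  obtain ⟨k, hk, rfl⟩ := hp
  rw [List.mem_map] at hyp
  obtain ⟨m, _, rfl⟩ := hyp
  simp

-- every non-task match has priority ≥ 1
lemma exact_pos (t : String) (v : Nat × String) (h : pvExact.get? t = some v) : 1 ≤ v.1 := by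
  simp only [pvExact, PySem.Dict.get?, Option.map_eq_some_iff] at h
  obtain ⟨p, hp, rfl⟩ := h
  have hm := List.mem_of_find?_eq_some hp
  simp only [List.mem_cons, List.not_mem_nil, or_false] at hm
  rcases hm with rfl | rfl | rfl | rfl | rfl | rfl <;> decide

lemma substr_pos (t : String) (y : Nat × String)
    (h : y ∈ pvSubstr.filterMap (fun r =>
        if r.2.1.any (fun k => PySem.Str.isIn k t) then some (r.1, r.2.2) else none)) :
    2 ≤ y.1 := by
  rw [List.mem_filterMap] at h
  obtain ⟨r, hr, he⟩ := h
  have h2 : ∀ r ∈ pvSubstr, 2 ≤ r.1 := by decide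
  have h3 := h2 r hr
  split_ifs at he
  injection he with he2
  rw [← he2]
  exact h3

lemma selO_some (m : Nat × String) (fb : Bool × String) : pvSelO (some m) fb = (true, m.2) := rfl

lemma selO_none (fb : Bool × String) : pvSelO none fb = fb := rfl

-- findSome? over an if-then-some rule list unfolds to the if-chain
lemma findSome?_if_cons {α β : Type} (p : α → Bool) (g : α → β) (a : α) (l : List α) :
    List.findSome? (fun x => if p x then some (g x) else none) (a :: l) =
    if p a then some (g a) else List.findSome? (fun x => if p x then some (g x) else none) l := by
  rw [List.findSome?_cons]
  split <;> split_ifs <;> simp_all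

-- min over the filtered substring rules = first match (priorities strictly increase)
lemma filter_min (t : String) (fb : Bool × String) :
    ∀ (rs : List (Nat × List String × String)),
      rs.Pairwise (fun a b => a.1 < b.1) →
      pvSel2 (rs.filterMap (fun r =>
          if r.2.1.any (fun k => PySem.Str.isIn k t) then some (r.1, r.2.2) else none)) fb =
      pvSelO (rs.findSome? (fun r =>
          if r.2.1.any (fun k => PySem.Str.isIn k t) then some (r.1, r.2.2) else none)) fb := by
  intro rs
  induction rs with
  | nil => intro _; rfl
  | cons r rs ih =>
    intro hp
    have hp' := (List.pairwise_cons.mp hp).2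
    have hlt := (List.pairwise_cons.mp hp).1
    by_cases hc : r.2.1.any (fun k => PySem.Str.isIn k t) = true
    · have hf : (r :: rs).filterMap (fun r =>
            if r.2.1.any (fun k => PySem.Str.isIn k t) then some (r.1, r.2.2) else none)
          = (r.1, r.2.2) :: rs.filterMap (fun r =>
            if r.2.1.any (fun k => PySem.Str.isIn k t) then some (r.1, r.2.2) else none) := by
        rw [List.filterMap_cons, if_pos hc]
      have hs : (r :: rs).findSome? (fun r =>
            if r.2.1.any (fun k => PySem.Str.isIn k t) then some (r.1, r.2.2) else none)
          = some (r.1, r.2.2) := by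
        rw [List.findSome?_cons, if_pos hc]
      rw [hf, hs]
      simp only [pvSel2, pvSelO]
      rw [foldl_stay2 _ _ (fun y hy => by
        rw [List.mem_filterMap] at hy
        obtain ⟨r', hr', he⟩ := hy
        have hr2 := hlt r' hr'
        split_ifs at he
        injection he with he2
        simp only [pvLt2, ← he2]
        have hx1 : ¬ (r'.1 < r.1) := by omega
        have hx2 : ¬ (r'.1 = r.1) := by omega
        simp [hx1, hx2])]
    · simp only [Bool.not_eq_true] at hc
      have hf : (r :: rs).filterMap (fun r =>
            if r.2.1.any (fun k => PySem.Str.isIn k t) then some (r.1, r.2.2) else none)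
          = rs.filterMap (fun r =>
            if r.2.1.any (fun k => PySem.Str.isIn k t) then some (r.1, r.2.2) else none) := by
        rw [List.filterMap_cons, if_neg (ne_true_of_eq_false hc)]
      have hs : (r :: rs).findSome? (fun r =>
            if r.2.1.any (fun k => PySem.Str.isIn k t) then some (r.1, r.2.2) else none)
          = rs.findSome? (fun r =>
            if r.2.1.any (fun k => PySem.Str.isIn k t) then some (r.1, r.2.2) else none) := by
        rw [List.findSome?_cons, if_neg (ne_true_of_eq_false hc)]
      rw [hf, hs]
      exact ih hp'

-- the head step of A's chain, expressed through pvMatches + min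
lemma step_eq (t : String) (fb : Bool × String) :
    pvSel2 (pvMatches t) fb =
    (if PySem.Str.isIn "task" t then
      (if PySem.Str.isIn "bug" t then ((true : Bool), "task-bug-hunting") else (true, t))
    else if t == "blog" || t == "blogs" then (true, "blog")
    else if PySem.Str.isIn "idea" t || PySem.Str.isIn "suggestion" t then (true, "ideas")
    else if PySem.Str.isIn "develop" t then (true, "development")
    else if t == "graphic" || t == "graphics" then (true, "graphics")
    else if PySem.Str.isIn "bughunt" t || PySem.Str.isIn "bug-hunt" t then (true, "bug-hunting")
    else if PySem.Str.isIn "analysis" t then (true, "analysis")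
    else if PySem.Str.isIn "visibility" t || PySem.Str.isIn "social" t then (true, "social")
    else if PySem.Str.isIn "videotut" t || PySem.Str.isIn "video-tut" t then (true, "video-tutorials")
    else if t == "tutorial" || t == "tutorials" then (true, "tutorials")
    else if PySem.Str.isIn "copywrit" t then (true, "copywriting")
    else if PySem.Str.isIn "document" t then (true, "documentation")
    else if PySem.Str.isIn "translation" t then (true, "translations")
    else fb) := by
  by_cases htask : PySem.Str.isIn "task" t = true
  · -- the (0, …) task match wins against everything else (priority ≥ 1)
    have hm : pvMatches t
        = ((0 : Nat), if PySem.Str.isIn "bug" t then "task-bug-hunting" else t)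
          :: ((pvExact.get? t).toList ++ pvSubstr.filterMap (fun r =>
              if r.2.1.any (fun k => PySem.Str.isIn k t) then some (r.1, r.2.2) else none)) := by
      simp only [pvMatches]
      rw [if_pos htask, List.singleton_append, List.cons_append]
    rw [hm]
    simp only [pvSel2]
    rw [foldl_stay2 _ _ (fun y hy => by
      rw [List.mem_append] at hy
      have hpos : 1 ≤ y.1 := by
        rcases hy with hy | hy
        · exact exact_pos t y (by simpa using hy)
        · have := substr_pos t y hy; omega
      simp only [pvLt2]
      have hx1 : ¬ (y.1 < 0) := by omega
      have hx2 : ¬ (y.1 = 0) := by omega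
      simp [hx1, hx2])]
    rw [if_pos htask]
    by_cases hbug : PySem.Str.isIn "bug" t = true
    · rw [if_pos hbug, if_pos hbug]
    · rw [if_neg hbug, if_neg hbug]
  · simp only [Bool.not_eq_true] at htask
    by_cases h1 : t = "blog";     · subst h1; rfl
    by_cases h2 : t = "blogs";    · subst h2; rfl
    by_cases h3 : t = "graphic";  · subst h3; rfl
    by_cases h4 : t = "graphics"; · subst h4; rfl
    by_cases h5 : t = "tutorial"; · subst h5; rfl
    by_cases h6 : t = "tutorials";· subst h6; rfl
    have hget : pvExact.get? t = none := by
      have e1 : ("blog" == t) = false := beq_eq_false_iff_ne.mpr (fun h => h1 h.symm)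
      have e2 : ("blogs" == t) = false := beq_eq_false_iff_ne.mpr (fun h => h2 h.symm)
      have e3 : ("graphic" == t) = false := beq_eq_false_iff_ne.mpr (fun h => h3 h.symm)
      have e4 : ("graphics" == t) = false := beq_eq_false_iff_ne.mpr (fun h => h4 h.symm)
      have e5 : ("tutorial" == t) = false := beq_eq_false_iff_ne.mpr (fun h => h5 h.symm)
      have e6 : ("tutorials" == t) = false := beq_eq_false_iff_ne.mpr (fun h => h6 h.symm)
      simp [pvExact, PySem.Dict.get?, List.find?, e1, e2, e3, e4, e5, e6]
    have hm : pvMatches t = pvSubstr.filterMap (fun r =>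
        if r.2.1.any (fun k => PySem.Str.isIn k t) then some (r.1, r.2.2) else none) := by
      simp only [pvMatches]
      rw [if_neg (ne_true_of_eq_false htask), hget]
      simp
    rw [hm, filter_min t fb pvSubstr (by decide)]
    rw [show pvSubstr.findSome? (fun r =>
          if r.2.1.any (fun k => PySem.Str.isIn k t) then some (r.1, r.2.2) else none)
        = pvSubstr.findSome? (fun r =>
          if (fun r : Nat × List String × String => r.2.1.any (fun k => PySem.Str.isIn k t)) r then
            some ((fun r : Nat × List String × String => (r.1, r.2.2)) r) else none) from rfl]
    rw [pvSubstr]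
    rw [findSome?_if_cons, findSome?_if_cons, findSome?_if_cons, findSome?_if_cons,
        findSome?_if_cons, findSome?_if_cons, findSome?_if_cons, findSome?_if_cons,
        findSome?_if_cons, List.findSome?_nil]
    have hb1 : (t == "blog" || t == "blogs") = false := by simp [h1, h2]
    have hb2 : (t == "graphic" || t == "graphics") = false := by simp [h3, h4]
    have hb3 : (t == "tutorial" || t == "tutorials") = false := by simp [h5, h6]
    simp only [selO_some, selO_none, apply_ite (fun o : Option (Nat × String) => pvSelO o fb),
      List.any_cons, List.any_nil, Bool.or_false, htask, hb1, hb2, hb3,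
      Bool.false_eq_true, if_false]

-- ===== VERDICT (by name: the statement is the Claim_ definition above) =====
theorem valid_category_spec : Claim_equal_valid_category := by
  intro tags _
  unfold Spec_valid_category
  induction tags with
  | nil => rfl
  | cons t rest ih =>
    rename_i hdom
    have hrest : Dom_valid_category rest := by
      simp_all [Dom_valid_category, List.all_cons]
    have hB : valid_category_alt (t :: rest) = pvSel2 (pvMatches t) (valid_category_alt rest) := by
      rw [show valid_category_alt (t :: rest) = pvSelect (pvCandidates (t :: rest)) from rfl,
        cand_cons]
      cases hm : pvMatches t with
      | nil =>
        simp only [List.map_nil, List.nil_append, pvSel2]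
        exact select_shift (pvCandidates rest)
      | cons m ms =>
        simp only [List.map_cons, List.cons_append, pvSelect, pvSel2]
        rw [zero_fold ms _ m (fun y hy => by
          rw [List.mem_map] at hy
          obtain ⟨z, hz1, hz2⟩ := hy
          have h0 := cand_nonneg rest z hz1
          subst hz2
          simp
          omega)]
    rw [hB, ← ih hrest]
    exact (step_eq t (valid_category rest)).symm
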